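-- pv_equiv track=rewrite | github.com/taurus-org/taurus | doc/source/sphinxext/taurusextension.py | process_type
-- ===== SOURCE A (Python) =====
-- __expr = ('or',)
--
-- def process_type(t, obj_type='class'):
--     t = t.strip()
--     if not t:
--         return ''
--     if t in __expr:
--         return t
--     if t.count(' or '):
--         i = t.index(' or ')
--         return ' '.join(map(process_type, (t[:i], 'or', t[i + 4:])))
--     if not t.count('<') or not t.count('>'):
--         ret = ':%s:`~%s`' % (obj_type, t)
--         return ret
--
--     # process a container template
--     start, stop = t.index('<'), t.index('>')
--     main_type = t[:start]
--     main_type = process_type(main_type)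
--     types = t[start + 1:stop].split(',')
--     types = ', '.join(map(process_type, types))
--     return "%s <%s>" % (main_type, types)
-- ===== SOURCE B (Python) =====
-- __expr = ('or',)
--
-- def _markup(s, obj_type):
--     # s is stripped and contains no ' or '; render one alternative
--     if not s:
--         return ''
--     if s in __expr:
--         return s
--     lt, gt = s.find('<'), s.find('>')
--     if lt < 0 or gt < 0:
--         return ':%s:`~%s`' % (obj_type, s)
--     inner = ', '.join(_markup(p.strip(), 'class') for p in s[lt + 1:gt].split(','))
--     return '%s <%s>' % (_markup(s[:lt].strip(), 'class'), inner)
--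
-- def process_type(t, obj_type='class'):
--     # phase 1: tokenize into ' or '-separated alternatives (re-stripping the
--     # remainder before re-scanning); phase 2: render each piece and join.
--     s = t.strip()
--     pieces = []
--     while True:
--         i = s.find(' or ')
--         if i < 0:
--             pieces.append(s)
--             break
--         pieces.append(s[:i])
--         s = s[i + 4:].strip()
--     if len(pieces) == 1:
--         return _markup(pieces[0], obj_type)
--     return ' or '.join(_markup(p.strip(), 'class') for p in pieces)
-- ===== Notes on version B (the rewrite author's own statement) =====
-- stated objective: alternative
-- what changed: B is staged: an iterative tokenizer first collects all ' or '-separated alternatives (re-stripping the remainder before re-scanning), then a separate renderer _markup -- which has no ' or ' logic at all and recurses only over the container structure -- formats each piece and the results are joined with ' or '; A is one recursive function that mixes the ' or ' scan with the formatting via right-recursion on the tail.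
import Mathlib
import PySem

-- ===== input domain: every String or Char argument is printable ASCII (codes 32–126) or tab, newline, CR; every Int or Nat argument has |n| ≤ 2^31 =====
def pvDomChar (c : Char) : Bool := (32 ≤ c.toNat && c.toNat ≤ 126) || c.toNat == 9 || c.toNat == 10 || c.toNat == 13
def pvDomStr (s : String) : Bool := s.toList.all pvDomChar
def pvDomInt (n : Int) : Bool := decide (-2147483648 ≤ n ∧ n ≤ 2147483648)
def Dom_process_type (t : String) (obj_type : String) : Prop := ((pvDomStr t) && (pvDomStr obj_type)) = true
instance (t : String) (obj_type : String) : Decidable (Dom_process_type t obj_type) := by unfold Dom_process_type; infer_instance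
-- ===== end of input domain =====

-- B re-decomposes the function into two stages: an iterative tokenizer collecting the
-- ' or '-separated alternatives, then a renderer with no ' or ' logic recursing only over the
-- container structure; equal return value on every input, no speed claim.

-- ===== PORT A =====
-- helper lemmas cited by the ports' decreasing_by (termination only)

-- acc is a lower bound of count.go
theorem pv_countgo_le (sub : List Char) : ∀ (fuel : Nat) (l : List Char) (acc : Nat),
    acc ≤ PySem.Chars.count.go sub fuel l acc := by
  intro fuel
  induction fuel with
  | zero => intro l acc; simp [PySem.Chars.count.go]
  | succ n ih =>
    intro l acc
    cases l with
    | nil => simp [PySem.Chars.count.go]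
    | cons h t =>
      rw [PySem.Chars.count.go]
      split
      · exact le_trans (Nat.le_succ acc) (ih _ _)
      · exact ih _ _

theorem pv_countgo_eq_acc_iff (sub : List Char) (hsub : sub ≠ []) :
    ∀ (fuel : Nat) (l : List Char) (acc : Nat), l.length ≤ fuel →
      (PySem.Chars.count.go sub fuel l acc = acc ↔ ¬ sub <:+: l) := by
  intro fuel
  induction fuel with
  | zero =>
    intro l acc hl
    have : l = [] := List.eq_nil_of_length_eq_zero (Nat.le_zero.mp hl)
    subst this
    simp [PySem.Chars.count.go, hsub]
  | succ n ih =>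
    intro l acc hl
    cases l with
    | nil => simp [PySem.Chars.count.go, hsub]
    | cons h t =>
      rw [PySem.Chars.count.go]
      split
      · rename_i hpre
        constructor
        · intro heq
          exfalso
          have h1 := pv_countgo_le sub n (List.drop sub.length (h :: t)) (acc + 1)
          omega
        · intro hni
          exact absurd (List.IsPrefix.isInfix (List.isPrefixOf_iff_prefix.mp hpre)) hni
      · rename_i hpre
        have ht : t.length ≤ n := by simpa using Nat.succ_le_succ_iff.mp hl
        rw [ih t acc ht, List.infix_cons_iff]
        constructor
        · intro hni hor
          rcases hor with hp | hi
          · exact hpre (List.isPrefixOf_iff_prefix.mpr hp)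
          · exact hni hi
        · intro hni hi
          exact hni (Or.inr hi)

-- Python's `s.count(sub)` is nonzero exactly when sub occurs in s (sub ≠ '')
theorem pv_count_ne_zero_iff (s sub : List Char) (hsub : sub ≠ []) :
    PySem.Chars.count s sub ≠ 0 ↔ sub <:+: s := by
  unfold PySem.Chars.count
  simp only [List.isEmpty_iff, hsub, if_false]
  rw [← not_iff_not, not_not]
  exact pv_countgo_eq_acc_iff sub hsub s.length s 0 le_rfl

-- the first occurrence returned by find fits inside s
theorem pv_find_add_le (s sub : List Char) (hsub : sub ≠ []) (h : sub <:+: s) :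
    (PySem.Chars.find s sub).toNat + sub.length ≤ s.length := by
  have h0 : 0 ≤ PySem.Chars.find s sub := (PySem.Chars.find_nonneg_iff s sub).mpr h
  have hspec := (PySem.Chars.find_spec h0).1
  have hlen : sub.length ≤ (List.drop (PySem.Chars.find s sub).toNat s).length :=
    hspec.length_le
  have hsub1 : 1 ≤ sub.length := List.length_pos_iff.mpr hsub
  simp only [List.length_drop] at hlen
  omega

theorem pv_length_strip_le (s : List Char) : (PySem.Chars.strip s).length ≤ s.length := by
  unfold PySem.Chars.strip PySem.Chars.rstrip PySem.Chars.lstrip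
  have h1 := (List.dropWhile_suffix (l := s) PySem.Chars.isspace).length_le
  have h2 := (List.dropWhile_suffix
      (l := (List.dropWhile PySem.Chars.isspace s).reverse) PySem.Chars.isspace).length_le
  simp only [List.length_reverse] at *
  omega

-- each piece of splitOn is an infix of the split string
theorem pv_splitOngo_mem (sep : List Char) :
    ∀ (fuel : Nat) (l cur : List Char) (acc : List (List Char)) (p : List Char),
      p ∈ PySem.Chars.splitOn.go sep fuel l cur acc →
      p ∈ acc ∨ p <:+: cur.reverse ++ l := by
  intro fuel
  induction fuel with
  | zero =>
    intro l cur acc p hp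
    rw [PySem.Chars.splitOn.go] at hp
    simp only [List.mem_reverse, List.mem_cons] at hp
    rcases hp with hp | hp
    · right; subst hp; exact List.infix_rfl
    · left; exact hp
  | succ n ih =>
    intro l cur acc p hp
    cases l with
    | nil =>
      rw [PySem.Chars.splitOn.go] at hp
      simp only [List.mem_reverse, List.mem_cons] at hp
      rcases hp with hp | hp
      · right; subst hp; simp
      · left; exact hp
      all_goals simp
    | cons c rest =>
      rw [PySem.Chars.splitOn.go] at hp
      split at hp
      · rcases ih _ _ _ _ hp with hin | hle
        · rcases List.mem_cons.mp hin with hp' | hp'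
          · right; subst hp'
            exact (List.prefix_append cur.reverse (c :: rest)).isInfix
          · left; exact hp'
        · right
          simp only [List.reverse_nil, List.nil_append] at hle
          exact hle.trans
            ((List.drop_suffix sep.length (c :: rest)).isInfix.trans
              (List.suffix_append cur.reverse (c :: rest)).isInfix)
      · rcases ih _ _ _ _ hp with hin | hle
        · left; exact hin
        · right
          simp only [List.reverse_cons] at hle
          simpa [List.append_assoc] using hle

theorem pv_infix_of_mem_splitOn (s sep p : List Char) (hp : p ∈ PySem.Chars.splitOn s sep) :
    p <:+: s := by
  unfold PySem.Chars.splitOn at hp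
  rcases pv_splitOngo_mem sep (s.length + 1) s [] [] p hp with h | h
  · simp at h
  · simpa using h

theorem pv_length_of_mem_splitOn (s sep p : List Char) (hp : p ∈ PySem.Chars.splitOn s sep) :
    p.length ≤ s.length :=
  (pv_infix_of_mem_splitOn s sep p hp).length_le

-- Python slices with Nat-valued indices, in take/drop normal form (cited by decreasing_by and the proofs)
theorem pv_slice_take (s : List Char) (k : Nat) :
    PySem.List.slice s none (some (k : Int)) = List.take k s := by
  rw [PySem.List.slice_to _ (by positivity)]
  simp

theorem pv_slice_drop4 (s : List Char) (k : Nat) :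
    PySem.List.slice s (some ((k : Int) + 4)) none = List.drop (k + 4) s := by
  rw [show ((k : Int) + 4) = ((k + 4 : Nat) : Int) by push_cast; ring,
    PySem.List.slice_from _ (by positivity)]
  simp only [Int.toNat_natCast]

theorem pv_slice_mid (s : List Char) (k m : Nat) :
    PySem.List.slice s (some ((k : Int) + 1)) (some (m : Int))
      = List.take (m - (k + 1)) (List.drop (k + 1) s) := by
  rw [show ((k : Int) + 1) = ((k + 1 : Nat) : Int) by push_cast; ring,
    PySem.List.slice_natCast]

-- one lemma per termination obligation of port A, cited by name in decreasing_by
theorem pv_decA1 (t : List Char)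
    (h3 : PySem.Chars.count (PySem.Chars.strip t) [' ', 'o', 'r', ' '] ≠ 0) :
    (PySem.List.slice (PySem.Chars.strip t) none
      (some ((PySem.Chars.find (PySem.Chars.strip t) [' ', 'o', 'r', ' ']).toNat : Int))).length
      < t.length := by
  have hin : [' ','o','r',' '] <:+: PySem.Chars.strip t :=
    (pv_count_ne_zero_iff _ _ (by simp)).mp h3
  have hb := pv_find_add_le _ _ (by simp) hin
  have hs := pv_length_strip_le t
  simp only [List.length_cons, List.length_nil] at hb
  rw [pv_slice_take]
  have h1 := List.length_take_le (PySem.Chars.find (PySem.Chars.strip t) [' ', 'o', 'r', ' ']).toNat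
    (PySem.Chars.strip t)
  omega

theorem pv_decA2 (t : List Char)
    (h3 : PySem.Chars.count (PySem.Chars.strip t) [' ', 'o', 'r', ' '] ≠ 0) :
    (['o','r'] : List Char).length < t.length := by
  have hin : [' ','o','r',' '] <:+: PySem.Chars.strip t :=
    (pv_count_ne_zero_iff _ _ (by simp)).mp h3
  have hs := pv_length_strip_le t
  have hl := hin.length_le
  simp only [List.length_cons, List.length_nil] at hl ⊢
  omega

theorem pv_decA3 (t : List Char)
    (h3 : PySem.Chars.count (PySem.Chars.strip t) [' ', 'o', 'r', ' '] ≠ 0) :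
    (PySem.List.slice (PySem.Chars.strip t)
      (some (((PySem.Chars.find (PySem.Chars.strip t) [' ', 'o', 'r', ' ']).toNat : Int) + 4))
      none).length < t.length := by
  have hin : [' ','o','r',' '] <:+: PySem.Chars.strip t :=
    (pv_count_ne_zero_iff _ _ (by simp)).mp h3
  have hb := pv_find_add_le _ _ (by simp) hin
  have hs := pv_length_strip_le t
  rw [pv_slice_drop4]
  simp only [List.length_drop, List.length_cons, List.length_nil] at hb hs ⊢
  omega

theorem pv_decA4 (t : List Char)
    (h4 : ¬ (PySem.Chars.count (PySem.Chars.strip t) ['<'] = 0 ∨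
             PySem.Chars.count (PySem.Chars.strip t) ['>'] = 0)) :
    (PySem.List.slice (PySem.Chars.strip t) none
      (some ((PySem.Chars.find (PySem.Chars.strip t) ['<']).toNat : Int))).length < t.length := by
  have hin : ['<'] <:+: PySem.Chars.strip t :=
    (pv_count_ne_zero_iff _ _ ((by simp : (['<'] : List Char) ≠ []))).mp
      (by simpa using (not_or.mp h4).1)
  have hb := pv_find_add_le _ _ (by simp) hin
  have hs := pv_length_strip_le t
  simp only [List.length_cons, List.length_nil] at hb
  rw [pv_slice_take]
  have h1 := List.length_take_le (PySem.Chars.find (PySem.Chars.strip t) ['<']).toNat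
    (PySem.Chars.strip t)
  omega

theorem pv_decA5 (t : List Char)
    (h4 : ¬ (PySem.Chars.count (PySem.Chars.strip t) ['<'] = 0 ∨
             PySem.Chars.count (PySem.Chars.strip t) ['>'] = 0))
    (p : List Char)
    (hp : p ∈ PySem.Chars.splitOn
      (PySem.List.slice (PySem.Chars.strip t)
        (some (((PySem.Chars.find (PySem.Chars.strip t) ['<']).toNat : Int) + 1))
        (some ((PySem.Chars.find (PySem.Chars.strip t) ['>']).toNat : Int)))
      [',']) :
    p.length < t.length := by
  have hin : ['<'] <:+: PySem.Chars.strip t :=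
    (pv_count_ne_zero_iff _ _ ((by simp : (['<'] : List Char) ≠ []))).mp
      (by simpa using (not_or.mp h4).1)
  have hb := pv_find_add_le _ _ (by simp) hin
  have hs := pv_length_strip_le t
  simp only [List.length_cons, List.length_nil] at hb
  have hple := pv_length_of_mem_splitOn _ _ _ hp
  rw [pv_slice_mid] at hple
  have h1 := (List.take_sublist ((PySem.Chars.find (PySem.Chars.strip t) ['>']).toNat
      - ((PySem.Chars.find (PySem.Chars.strip t) ['<']).toNat + 1))
    (List.drop ((PySem.Chars.find (PySem.Chars.strip t) ['<']).toNat + 1)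
      (PySem.Chars.strip t))).length_le
  rw [List.length_drop] at h1
  omega

-- literal transliteration of A on code points: strip, the '', 'or', ' or ', leaf and
-- container branches in source order; recursion exactly where A recurses.
def pvProcA (t : List Char) (obj : List Char) : List Char :=
  if PySem.Chars.strip t = [] then []
  else if PySem.Chars.strip t = ['o', 'r'] then PySem.Chars.strip t
  else if h3 : PySem.Chars.count (PySem.Chars.strip t) [' ', 'o', 'r', ' '] ≠ 0 then
    -- i = t.index(' or '); ' '.join(map(process_type, (t[:i], 'or', t[i+4:])))
    PySem.Chars.join [' ']
      [pvProcA (PySem.List.slice (PySem.Chars.strip t) none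
          (some ((PySem.Chars.find (PySem.Chars.strip t) [' ', 'o', 'r', ' ']).toNat : Int)))
          ['c','l','a','s','s'],
       pvProcA ['o','r'] ['c','l','a','s','s'],
       pvProcA (PySem.List.slice (PySem.Chars.strip t)
          (some (((PySem.Chars.find (PySem.Chars.strip t) [' ', 'o', 'r', ' ']).toNat : Int) + 4)) none)
          ['c','l','a','s','s']]
  else if h4 : PySem.Chars.count (PySem.Chars.strip t) ['<'] = 0 ∨
               PySem.Chars.count (PySem.Chars.strip t) ['>'] = 0 then
    [':'] ++ obj ++ [':', '`', '~'] ++ PySem.Chars.strip t ++ ['`']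
  else
    -- start, stop = t.index('<'), t.index('>'); container template
    pvProcA (PySem.List.slice (PySem.Chars.strip t) none
        (some ((PySem.Chars.find (PySem.Chars.strip t) ['<']).toNat : Int))) ['c','l','a','s','s']
      ++ [' ', '<']
      ++ PySem.Chars.join [',', ' ']
          ((PySem.Chars.splitOn
              (PySem.List.slice (PySem.Chars.strip t)
                (some (((PySem.Chars.find (PySem.Chars.strip t) ['<']).toNat : Int) + 1))
                (some ((PySem.Chars.find (PySem.Chars.strip t) ['>']).toNat : Int)))
              [',']).attach.map (fun p => pvProcA p.1 ['c','l','a','s','s']))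
      ++ ['>']
termination_by t.length
decreasing_by
  · exact pv_decA1 t h3
  · exact pv_decA2 t h3
  · exact pv_decA3 t h3
  · exact pv_decA4 t h4
  · exact pv_decA5 t h4 p.1 p.2

def process_type (t : String) (obj_type : String) : String :=
  String.ofList (pvProcA t.toList obj_type.toList)

-- ===== PORT B =====
-- termination lemmas for B's two helpers
theorem pv_decM1 (s : List Char)
    (h : ¬ (PySem.Chars.find s ['<'] < 0 ∨ PySem.Chars.find s ['>'] < 0)) :
    (PySem.Chars.strip (PySem.List.slice s none
      (some ((PySem.Chars.find s ['<']).toNat : Int)))).length < s.length := by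
  have hin : ['<'] <:+: s := (PySem.Chars.find_nonneg_iff s ['<']).mp (not_lt.mp (not_or.mp h).1)
  have hb := pv_find_add_le _ _ (by simp) hin
  simp only [List.length_cons, List.length_nil] at hb
  rw [pv_slice_take]
  have h1 := pv_length_strip_le (List.take (PySem.Chars.find s ['<']).toNat s)
  have h2 := List.length_take_le (PySem.Chars.find s ['<']).toNat s
  omega

theorem pv_decM2 (s : List Char)
    (h : ¬ (PySem.Chars.find s ['<'] < 0 ∨ PySem.Chars.find s ['>'] < 0))
    (p : List Char)
    (hp : p ∈ PySem.Chars.splitOn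
      (PySem.List.slice s (some (((PySem.Chars.find s ['<']).toNat : Int) + 1))
        (some ((PySem.Chars.find s ['>']).toNat : Int))) [',']) :
    (PySem.Chars.strip p).length < s.length := by
  have hin : ['<'] <:+: s := (PySem.Chars.find_nonneg_iff s ['<']).mp (not_lt.mp (not_or.mp h).1)
  have hb := pv_find_add_le _ _ (by simp) hin
  simp only [List.length_cons, List.length_nil] at hb
  have hple := pv_length_of_mem_splitOn _ _ _ hp
  rw [pv_slice_mid] at hple
  have h1 := (List.take_sublist ((PySem.Chars.find s ['>']).toNat
      - ((PySem.Chars.find s ['<']).toNat + 1))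
    (List.drop ((PySem.Chars.find s ['<']).toNat + 1) s)).length_le
  rw [List.length_drop] at h1
  have h2 := pv_length_strip_le p
  omega

theorem pv_decP (s : List Char) (h : 0 ≤ PySem.Chars.find s [' ', 'o', 'r', ' ']) :
    (PySem.Chars.strip (PySem.List.slice s
      (some (((PySem.Chars.find s [' ', 'o', 'r', ' ']).toNat : Int) + 4)) none)).length
      < s.length := by
  have hin : [' ','o','r',' '] <:+: s := (PySem.Chars.find_nonneg_iff s _).mp h
  have hb := pv_find_add_le _ _ (by simp) hin
  have hst := pv_length_strip_le (PySem.List.slice s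
      (some (((PySem.Chars.find s [' ', 'o', 'r', ' ']).toNat : Int) + 4)) none)
  rw [pv_slice_drop4] at hst ⊢
  simp only [List.length_drop, List.length_cons, List.length_nil] at hb hst ⊢
  omega

-- Source B's _markup: render ONE alternative (input stripped, no ' or ' logic at all);
-- recursion only over the container structure, stripping each sub-piece before recursing.
def pvMarkup (s : List Char) (obj : List Char) : List Char :=
  if s = [] then []
  else if s = ['o', 'r'] then s
  else if h : PySem.Chars.find s ['<'] < 0 ∨ PySem.Chars.find s ['>'] < 0 then
    [':'] ++ obj ++ [':', '`', '~'] ++ s ++ ['`']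
  else
    pvMarkup (PySem.Chars.strip (PySem.List.slice s none
        (some ((PySem.Chars.find s ['<']).toNat : Int)))) ['c','l','a','s','s']
      ++ [' ', '<']
      ++ PySem.Chars.join [',', ' ']
          ((PySem.Chars.splitOn
              (PySem.List.slice s (some (((PySem.Chars.find s ['<']).toNat : Int) + 1))
                (some ((PySem.Chars.find s ['>']).toNat : Int)))
              [',']).attach.map (fun p => pvMarkup (PySem.Chars.strip p.1) ['c','l','a','s','s']))
      ++ ['>']
termination_by s.length
decreasing_by
  · exact pv_decM1 s h
  · exact pv_decM2 s h p.1 p.2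

-- Source B's tokenizer loop: collect the ' or '-separated alternatives, re-stripping the
-- remainder before re-scanning (s.find(' or ') < 0 ends the loop).
def pvPieces (s : List Char) : List (List Char) :=
  if h : 0 ≤ PySem.Chars.find s [' ', 'o', 'r', ' '] then
    PySem.List.slice s none (some ((PySem.Chars.find s [' ', 'o', 'r', ' ']).toNat : Int))
      :: pvPieces (PySem.Chars.strip (PySem.List.slice s
            (some (((PySem.Chars.find s [' ', 'o', 'r', ' ']).toNat : Int) + 4)) none))
  else [s]
termination_by s.length
decreasing_by
  exact pv_decP s h

-- Source B's process_type: tokenize, then render each piece and join with ' or '.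
def pvProcB (t : List Char) (obj : List Char) : List Char :=
  let ps := pvPieces (PySem.Chars.strip t)
  if ps.length = 1 then pvMarkup (ps.headD []) obj
  else PySem.Chars.join [' ', 'o', 'r', ' ']
    (ps.map (fun p => pvMarkup (PySem.Chars.strip p) ['c','l','a','s','s']))

def process_type_alt (t : String) (obj_type : String) : String :=
  String.ofList (pvProcB t.toList obj_type.toList)

-- ===== PRECONDITION & SPEC =====
def Spec_process_type (t : String) (obj_type : String) (out : String) : Prop := out = process_type_alt t obj_type
instance (t : String) (obj_type : String) (out : String) : Decidable (Spec_process_type t obj_type out) := by unfold Spec_process_type; infer_instance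

-- ===== CLAIM (what is proved, stated in full; the proofs are below) =====
def Claim_equal_process_type : Prop := ∀ (t : String) (obj_type : String), Dom_process_type t obj_type → Spec_process_type t obj_type (process_type t obj_type)

-- ===== LEMMAS AND PROOFS =====

theorem pv_strip_infix (s : List Char) : PySem.Chars.strip s <:+: s := by
  unfold PySem.Chars.strip PySem.Chars.rstrip PySem.Chars.lstrip
  refine List.IsInfix.trans ?_ (List.dropWhile_suffix PySem.Chars.isspace).isInfix
  have := List.reverse_prefix.mpr
    (List.dropWhile_suffix (l := (List.dropWhile PySem.Chars.isspace s).reverse)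
      PySem.Chars.isspace)
  simpa using this.isInfix

theorem pv_strip_strip (s : List Char) :
    PySem.Chars.strip (PySem.Chars.strip s) = PySem.Chars.strip s := by
  unfold PySem.Chars.strip
  have h1 : PySem.Chars.lstrip (PySem.Chars.rstrip (PySem.Chars.lstrip s))
      = PySem.Chars.rstrip (PySem.Chars.lstrip s) := by
    unfold PySem.Chars.lstrip PySem.Chars.rstrip
    apply List.dropWhile_eq_self_iff.mpr
    intro hl hsp
    have hpre : (List.dropWhile PySem.Chars.isspace
        (List.dropWhile PySem.Chars.isspace s).reverse).reverse
        <+: List.dropWhile PySem.Chars.isspace s := by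
      have := List.reverse_prefix.mpr
        (List.dropWhile_suffix (l := (List.dropWhile PySem.Chars.isspace s).reverse)
          PySem.Chars.isspace)
      simpa using this
    have hlt : 0 < (List.dropWhile PySem.Chars.isspace s).length :=
      lt_of_lt_of_le hl hpre.length_le
    have hne : List.dropWhile PySem.Chars.isspace s ≠ [] := by
      intro hnil
      rw [hnil] at hlt
      simp at hlt
    have hg := hpre.getElem (i := 0) hl
    rw [hg] at hsp
    have hh := List.head_dropWhile_not PySem.Chars.isspace hne
    rw [List.head_eq_getElem] at hh
    exact absurd (hsp.symm.trans hh) (by simp)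
  rw [h1]
  unfold PySem.Chars.rstrip
  rw [List.reverse_reverse, List.dropWhile_idempotent]

-- there is no occurrence of sub strictly before the first one (find's minimality)
theorem pv_not_infix_take_find (s sub : List Char) (hsub : sub ≠ [])
    (h : sub <:+: s) :
    ¬ sub <:+: List.take (PySem.Chars.find s sub).toNat s := by
  intro hinf
  have h0 : 0 ≤ PySem.Chars.find s sub := (PySem.Chars.find_nonneg_iff s sub).mpr h
  obtain ⟨j, hj⟩ := (PySem.Chars.exists_prefix_drop_iff_isIn sub _).mpr
    ((PySem.Chars.isIn_iff_infix _ _).mpr hinf)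
  rw [List.drop_take] at hj
  have hjlt : j < (PySem.Chars.find s sub).toNat := by
    by_contra hge
    have h0' : (PySem.Chars.find s sub).toNat - j = 0 := by omega
    rw [h0', List.take_zero, List.prefix_nil] at hj
    exact hsub hj
  exact (PySem.Chars.find_spec h0).2 j hjlt
    (hj.trans (List.take_prefix _ _))

-- plain-`ite`/plain-`map` unfolding equations for the recursive definitions
theorem pvProcA_eq (t obj : List Char) : pvProcA t obj =
    (if PySem.Chars.strip t = [] then []
     else if PySem.Chars.strip t = ['o', 'r'] then PySem.Chars.strip t
     else if PySem.Chars.count (PySem.Chars.strip t) [' ', 'o', 'r', ' '] ≠ 0 then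
       PySem.Chars.join [' ']
         [pvProcA (List.take (PySem.Chars.find (PySem.Chars.strip t) [' ', 'o', 'r', ' ']).toNat
             (PySem.Chars.strip t)) ['c','l','a','s','s'],
          pvProcA ['o','r'] ['c','l','a','s','s'],
          pvProcA (List.drop ((PySem.Chars.find (PySem.Chars.strip t) [' ', 'o', 'r', ' ']).toNat + 4)
             (PySem.Chars.strip t)) ['c','l','a','s','s']]
     else if PySem.Chars.count (PySem.Chars.strip t) ['<'] = 0 ∨
             PySem.Chars.count (PySem.Chars.strip t) ['>'] = 0 then
       [':'] ++ obj ++ [':', '`', '~'] ++ PySem.Chars.strip t ++ ['`']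
     else
       pvProcA (List.take (PySem.Chars.find (PySem.Chars.strip t) ['<']).toNat
           (PySem.Chars.strip t)) ['c','l','a','s','s']
         ++ [' ', '<']
         ++ PySem.Chars.join [',', ' ']
             ((PySem.Chars.splitOn
                 (List.take ((PySem.Chars.find (PySem.Chars.strip t) ['>']).toNat
                     - ((PySem.Chars.find (PySem.Chars.strip t) ['<']).toNat + 1))
                   (List.drop ((PySem.Chars.find (PySem.Chars.strip t) ['<']).toNat + 1)
                     (PySem.Chars.strip t)))
                 [',']).map (fun p => pvProcA p ['c','l','a','s','s']))
         ++ ['>']) := by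
  rw [pvProcA.eq_def]
  simp only [dite_eq_ite, List.map_subtype, List.unattach_attach, pv_slice_take, pv_slice_drop4,
    pv_slice_mid]

theorem pvMarkup_eq (s obj : List Char) : pvMarkup s obj =
    (if s = [] then []
     else if s = ['o', 'r'] then s
     else if PySem.Chars.find s ['<'] < 0 ∨ PySem.Chars.find s ['>'] < 0 then
       [':'] ++ obj ++ [':', '`', '~'] ++ s ++ ['`']
     else
       pvMarkup (PySem.Chars.strip (List.take (PySem.Chars.find s ['<']).toNat s))
           ['c','l','a','s','s']
         ++ [' ', '<']
         ++ PySem.Chars.join [',', ' ']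
             ((PySem.Chars.splitOn
                 (List.take ((PySem.Chars.find s ['>']).toNat
                     - ((PySem.Chars.find s ['<']).toNat + 1))
                   (List.drop ((PySem.Chars.find s ['<']).toNat + 1) s))
                 [',']).map (fun p => pvMarkup (PySem.Chars.strip p) ['c','l','a','s','s']))
         ++ ['>']) := by
  rw [pvMarkup.eq_def]
  simp only [dite_eq_ite, List.map_subtype, List.unattach_attach, pv_slice_take, pv_slice_mid]

theorem pvPieces_eq (s : List Char) : pvPieces s =
    if 0 ≤ PySem.Chars.find s [' ', 'o', 'r', ' '] then
      List.take (PySem.Chars.find s [' ', 'o', 'r', ' ']).toNat s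
        :: pvPieces (PySem.Chars.strip
            (List.drop ((PySem.Chars.find s [' ', 'o', 'r', ' ']).toNat + 4) s))
    else [s] := by
  rw [pvPieces.eq_def]
  simp only [dite_eq_ite, pv_slice_take, pv_slice_drop4]

theorem pv_procA_strip (t obj : List Char) :
    pvProcA (PySem.Chars.strip t) obj = pvProcA t obj := by
  rw [pvProcA_eq, pvProcA_eq t]
  simp only [pv_strip_strip]

theorem pv_procA_or (obj : List Char) : pvProcA ['o','r'] obj = ['o','r'] := by
  rw [pvProcA_eq]
  have h : PySem.Chars.strip ['o','r'] = ['o','r'] := by decide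
  rw [h]
  rw [if_neg (by decide), if_pos rfl]

theorem pv_pieces_ne_nil (s : List Char) : pvPieces s ≠ [] := by
  rw [pvPieces_eq]
  split <;> simp

-- core lemma 1: on a stripped input with no ' or ', A equals B's renderer
theorem pv_markup_agrees : ∀ (n : Nat) (s obj : List Char), s.length ≤ n →
    PySem.Chars.strip s = s → ¬ [' ','o','r',' '] <:+: s →
    pvProcA s obj = pvMarkup s obj := by
  intro n
  induction n using Nat.strong_induction_on with
  | _ n IH =>
    intro s obj hn hst hnor
    rw [pvProcA_eq, pvMarkup_eq, hst]
    by_cases h1 : s = []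
    · rw [if_pos h1, if_pos h1]
    rw [if_neg h1, if_neg h1]
    by_cases h2 : s = ['o','r']
    · rw [if_pos h2, if_pos h2]
    rw [if_neg h2, if_neg h2]
    have hc3 : ¬ PySem.Chars.count s [' ', 'o', 'r', ' '] ≠ 0 := by
      rw [pv_count_ne_zero_iff _ _ (by simp)]; exact hnor
    rw [if_neg hc3]
    by_cases h4 : PySem.Chars.find s ['<'] < 0 ∨ PySem.Chars.find s ['>'] < 0
    · -- leaf branch on both sides
      have hc4 : PySem.Chars.count s ['<'] = 0 ∨ PySem.Chars.count s ['>'] = 0 := by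
        rcases h4 with h | h
        · left
          rw [← not_ne_iff, pv_count_ne_zero_iff _ _ (by simp),
            ← PySem.Chars.find_nonneg_iff]
          omega
        · right
          rw [← not_ne_iff, pv_count_ne_zero_iff _ _ (by simp),
            ← PySem.Chars.find_nonneg_iff]
          omega
      rw [if_pos hc4, if_pos h4]
    · -- container branch on both sides
      have hlt : ['<'] <:+: s :=
        (PySem.Chars.find_nonneg_iff s _).mp (not_lt.mp (not_or.mp h4).1)
      have hgt : ['>'] <:+: s :=
        (PySem.Chars.find_nonneg_iff s _).mp (not_lt.mp (not_or.mp h4).2)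
      have hc4 : ¬ (PySem.Chars.count s ['<'] = 0 ∨ PySem.Chars.count s ['>'] = 0) := by
        intro hor
        rcases hor with h0 | h0
        · exact (pv_count_ne_zero_iff _ _ (by simp)).mpr hlt h0
        · exact (pv_count_ne_zero_iff _ _ (by simp)).mpr hgt h0
      rw [if_neg hc4, if_neg h4]
      have hb := pv_find_add_le _ _ (by simp) hlt
      simp only [List.length_cons, List.length_nil] at hb
      -- main type: A recurses on the raw prefix, which A first strips
      have hmain : pvProcA (List.take (PySem.Chars.find s ['<']).toNat s) ['c','l','a','s','s']
          = pvMarkup (PySem.Chars.strip (List.take (PySem.Chars.find s ['<']).toNat s))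
              ['c','l','a','s','s'] := by
        rw [← pv_procA_strip]
        apply IH (PySem.Chars.strip (List.take (PySem.Chars.find s ['<']).toNat s)).length
        · have h1 := pv_length_strip_le (List.take (PySem.Chars.find s ['<']).toNat s)
          have h2 := List.length_take_le (PySem.Chars.find s ['<']).toNat s
          omega
        · exact le_rfl
        · exact pv_strip_strip _
        · intro hc
          exact hnor (hc.trans ((pv_strip_infix _).trans (List.take_prefix _ s).isInfix))
      rw [hmain]
      -- inner types: A recurses on each raw piece, which A first strips
      have hmap : (PySem.Chars.splitOn
            (List.take ((PySem.Chars.find s ['>']).toNat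
                - ((PySem.Chars.find s ['<']).toNat + 1))
              (List.drop ((PySem.Chars.find s ['<']).toNat + 1) s))
            [',']).map (fun p => pvProcA p ['c','l','a','s','s'])
          = (PySem.Chars.splitOn
            (List.take ((PySem.Chars.find s ['>']).toNat
                - ((PySem.Chars.find s ['<']).toNat + 1))
              (List.drop ((PySem.Chars.find s ['<']).toNat + 1) s))
            [',']).map (fun p => pvMarkup (PySem.Chars.strip p) ['c','l','a','s','s']) := by
        apply List.map_congr_left
        intro p hp
        have hpinf : p <:+: s :=
          (pv_infix_of_mem_splitOn _ _ _ hp).trans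
            ((List.take_prefix _ _).isInfix.trans (List.drop_suffix _ s).isInfix)
        have hple := pv_length_of_mem_splitOn _ _ _ hp
        have htk := (List.take_sublist ((PySem.Chars.find s ['>']).toNat
            - ((PySem.Chars.find s ['<']).toNat + 1))
          (List.drop ((PySem.Chars.find s ['<']).toNat + 1) s)).length_le
        rw [List.length_drop] at htk
        rw [← pv_procA_strip]
        apply IH (PySem.Chars.strip p).length
        · have h1 := pv_length_strip_le p
          omega
        · exact le_rfl
        · exact pv_strip_strip _
        · intro hc
          exact hnor (hc.trans ((pv_strip_infix _).trans hpinf))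
      rw [hmap]

-- core lemma 2: on a stripped input containing ' or ', A's right recursion equals the
-- join of B's renderer over B's tokenizer pieces
theorem pv_or_agrees : ∀ (n : Nat) (s obj : List Char), s.length ≤ n →
    PySem.Chars.strip s = s → 0 ≤ PySem.Chars.find s [' ', 'o', 'r', ' '] →
    pvProcA s obj = PySem.Chars.join [' ', 'o', 'r', ' ']
      ((pvPieces s).map (fun p => pvMarkup (PySem.Chars.strip p) ['c','l','a','s','s'])) := by
  intro n
  induction n using Nat.strong_induction_on with
  | _ n IH =>
    intro s obj hn hst hf
    have hin : [' ','o','r',' '] <:+: s := (PySem.Chars.find_nonneg_iff s _).mp hf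
    have hb := pv_find_add_le _ _ (by simp) hin
    simp only [List.length_cons, List.length_nil] at hb
    have h1 : s ≠ [] := by
      intro hnil; rw [hnil] at hb; simp at hb
    have h2 : s ≠ ['o','r'] := by
      intro hor; rw [hor] at hb; simp at hb
    have hc : PySem.Chars.count s [' ', 'o', 'r', ' '] ≠ 0 :=
      (pv_count_ne_zero_iff _ _ (by simp)).mpr hin
    rw [pvProcA_eq, hst, if_neg h1, if_neg h2, if_pos hc]
    rw [pvPieces_eq, if_pos hf, List.map_cons]
    -- the first piece: no ' or ' before the first occurrence
    have hfirst : pvProcA (List.take (PySem.Chars.find s [' ', 'o', 'r', ' ']).toNat s)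
        ['c','l','a','s','s']
        = pvMarkup (PySem.Chars.strip
            (List.take (PySem.Chars.find s [' ', 'o', 'r', ' ']).toNat s)) ['c','l','a','s','s'] := by
      rw [← pv_procA_strip]
      apply pv_markup_agrees (PySem.Chars.strip
        (List.take (PySem.Chars.find s [' ', 'o', 'r', ' ']).toNat s)).length _ _ le_rfl
        (pv_strip_strip _)
      intro hcin
      exact pv_not_infix_take_find s [' ','o','r',' '] (by simp) hin
        (hcin.trans (pv_strip_infix _))
    rw [PySem.Chars.join_cons_cons, PySem.Chars.join_cons_cons, PySem.Chars.join_singleton,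
      pv_procA_or, hfirst]
    set rest := PySem.Chars.strip
      (List.drop ((PySem.Chars.find s [' ', 'o', 'r', ' ']).toNat + 4) s) with hrest
    have hrlen : rest.length < n := by
      rw [hrest]
      have h3 := pv_length_strip_le
        (List.drop ((PySem.Chars.find s [' ', 'o', 'r', ' ']).toNat + 4) s)
      simp only [List.length_drop] at h3
      omega
    by_cases hc2 : 0 ≤ PySem.Chars.find rest [' ', 'o', 'r', ' ']
    · -- the remainder still contains ' or ': IH on it
      have hA := IH _ hrlen rest ['c','l','a','s','s'] le_rfl (by rw [hrest]; exact pv_strip_strip _) hc2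
      have hA' : pvProcA (List.drop ((PySem.Chars.find s [' ', 'o', 'r', ' ']).toNat + 4) s)
          ['c','l','a','s','s'] = PySem.Chars.join [' ', 'o', 'r', ' ']
            ((pvPieces rest).map (fun p => pvMarkup (PySem.Chars.strip p) ['c','l','a','s','s'])) := by
        rw [← pv_procA_strip, ← hrest, hA]
      obtain ⟨q, qs, hq⟩ : ∃ q qs, pvPieces rest = q :: qs := by
        cases hqq : pvPieces rest with
        | nil => exact absurd hqq (pv_pieces_ne_nil _)
        | cons q qs => exact ⟨q, qs, rfl⟩
      rw [hq] at hA' ⊢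
      rw [List.map_cons, PySem.Chars.join_cons_cons]
      rw [List.map_cons] at hA'
      rw [hA']
      simp [List.append_assoc]
    · -- the remainder has no further ' or ': it is the single last piece
      have hone : pvPieces rest = [rest] := by
        rw [pvPieces_eq, if_neg hc2]
      have hA' : pvProcA (List.drop ((PySem.Chars.find s [' ', 'o', 'r', ' ']).toNat + 4) s)
          ['c','l','a','s','s'] = pvMarkup rest ['c','l','a','s','s'] := by
        rw [← pv_procA_strip, ← hrest]
        apply pv_markup_agrees rest.length _ _ le_rfl (by rw [hrest]; exact pv_strip_strip _)
        rw [← PySem.Chars.find_nonneg_iff]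
        exact hc2
      rw [hone, List.map_singleton, PySem.Chars.join_cons_cons, PySem.Chars.join_singleton,
        hA', show PySem.Chars.strip rest = rest from by rw [hrest]; exact pv_strip_strip _]
      simp [List.append_assoc]

-- ===== VERDICT (by name: the statement is the Claim_ definition above) =====
theorem process_type_spec : Claim_equal_process_type := by
  intro t obj _
  unfold Spec_process_type process_type process_type_alt pvProcB
  apply congrArg String.ofList
  simp only []
  by_cases hf : 0 ≤ PySem.Chars.find (PySem.Chars.strip t.toList) [' ', 'o', 'r', ' ']
  · have hsplit := pvPieces_eq (PySem.Chars.strip t.toList)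
    rw [if_pos hf] at hsplit
    have hlen : (pvPieces (PySem.Chars.strip t.toList)).length ≠ 1 := by
      rw [hsplit]
      have := pv_pieces_ne_nil (PySem.Chars.strip
        (List.drop ((PySem.Chars.find (PySem.Chars.strip t.toList) [' ', 'o', 'r', ' ']).toNat + 4)
          (PySem.Chars.strip t.toList)))
      cases hq : pvPieces (PySem.Chars.strip
        (List.drop ((PySem.Chars.find (PySem.Chars.strip t.toList) [' ', 'o', 'r', ' ']).toNat + 4)
          (PySem.Chars.strip t.toList))) with
      | nil => exact absurd hq this
      | cons q qs => simp
    rw [if_neg hlen, ← pv_procA_strip]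
    exact pv_or_agrees (PySem.Chars.strip t.toList).length _ obj.toList le_rfl
      (pv_strip_strip _) hf
  · have hone : pvPieces (PySem.Chars.strip t.toList) = [PySem.Chars.strip t.toList] := by
      rw [pvPieces_eq, if_neg hf]
    rw [hone]
    simp only [List.length_singleton, List.headD_cons]
    rw [← pv_procA_strip]
    exact pv_markup_agrees (PySem.Chars.strip t.toList).length _ _ le_rfl (pv_strip_strip _)
      (by rw [← PySem.Chars.find_nonneg_iff]; exact hf)
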